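/- GENERATED by farm/mkstatement.py from design/units.split.tsv — do not edit.
   THE SPLIT of the proof unit `inverse_mdct.7` into `inverse_mdct.7a`, `inverse_mdct.7b`: the children's statements give the parent's
   UNCHANGED statement (so nothing above the parent — callers, compositions — is touched by the split). -/
import Vorbis.Spec.MdctTop7
import Vorbis.Spec.Units.inverse_mdct_7
import Vorbis.Spec.Units.inverse_mdct_7a
import Vorbis.Spec.Units.inverse_mdct_7b
namespace Vorbis.Spec.Splits
open X86 X86.User Asan

/-- The children of the split unit `inverse_mdct.7` prove it, by `Vorbis.Spec.inverse_mdct.Seg7.of_parts`. -/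
theorem inverse_mdct_7
    (h_inverse_mdct_7a : Vorbis.Spec.inverse_mdct_7a.Statement)
    (h_inverse_mdct_7b : Vorbis.Spec.inverse_mdct_7b.Statement) :
    Vorbis.Spec.inverse_mdct_7.Statement := by
  intro Lay _hLay μ _hμ u₀ _hcode _h_imdct_step3_inner_s_loop _h_imdct_step3_inner_s_loop_ld654 _h_asan_load8_noabort
  apply Vorbis.Spec.inverse_mdct.Seg7.of_parts
  · exact h_inverse_mdct_7a Lay _hLay μ _hμ u₀ _hcode _h_imdct_step3_inner_s_loop _h_imdct_step3_inner_s_loop_ld654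
  · exact h_inverse_mdct_7b Lay _hLay μ _hμ u₀ _hcode _h_asan_load8_noabort

end Vorbis.Spec.Splits
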